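-- pv_equiv track=rewrite | github.com/fangqiliz/fundamento-prog | ejercicio_lista.py | posicion_mayor_primo
-- ===== SOURCE A (Python) =====
-- def es_primo(numero):
--     if numero < 1:
--         return False
--     if numero == 2:
--         return True
--     if numero % 2 == 0:
--         return False
--     for i in range(3, int(numero**0.5)+1, 2):
--         if numero % i == 0:
--             return False
--
--     return True
--
-- def posicion_mayor_primo(numeros3):
--     max_primo = float('-inf')
--     pos_max_primo = -1
--
--     for i in range(len(numeros3)):
--         if es_primo(numeros3[i]):
--             if numeros3[i] > max_primo:
--                 max_primo = numeros3[i]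
--                 pos_max_primo = i
--
--     return pos_max_primo
-- ===== SOURCE B (Python) =====
-- def es_primo(numero):
--     if numero < 1:
--         return False
--     if numero == 2:
--         return True
--     if numero % 2 == 0:
--         return False
--     for i in range(3, int(numero**0.5)+1, 2):
--         if numero % i == 0:
--             return False
--
--     return True
--
-- def posicion_mayor_primo(numeros3):
--     # Stage 1: the candidate VALUES, each tested once, largest first.
--     # Stage 2: the first prime value in that order is the maximum prime;
--     # its first position in the list is the answer (A keeps first occurrences).
--     for v in sorted(set(numeros3), reverse=True):
--         if es_primo(v):
--             return numeros3.index(v)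
--     return -1
-- ===== Notes on version B (the rewrite author's own statement) =====
-- stated objective: alternative
-- what changed: Instead of A's positional scan that primality-tests every element while tracking a running maximum and its index, B stages the work: it sorts the distinct values (set + sorted reverse) descending, primality-tests them in that order only until the first prime, and returns list.index of that value; first-occurrence tie-break falls out of index().
import Mathlib
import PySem

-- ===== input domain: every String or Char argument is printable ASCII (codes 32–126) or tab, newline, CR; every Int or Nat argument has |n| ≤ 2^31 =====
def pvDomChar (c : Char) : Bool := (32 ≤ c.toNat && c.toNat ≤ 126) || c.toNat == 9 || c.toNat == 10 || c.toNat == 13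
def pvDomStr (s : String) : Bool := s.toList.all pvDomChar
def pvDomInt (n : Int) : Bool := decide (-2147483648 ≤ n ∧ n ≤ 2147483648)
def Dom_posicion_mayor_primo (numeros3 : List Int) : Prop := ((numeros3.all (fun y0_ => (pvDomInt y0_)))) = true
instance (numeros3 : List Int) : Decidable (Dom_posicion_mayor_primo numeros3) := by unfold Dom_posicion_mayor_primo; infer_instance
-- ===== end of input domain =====

set_option maxRecDepth 8192


-- B replaces A's index-by-index scan with a running maximum by two stages: sort the
-- DISTINCT values descending and return the list position of the first prime value
-- (objective: alternative; each distinct value is primality-tested at most once).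

-- ===== PORT A =====
-- int(numero**0.5) is ported as Nat.sqrt; exact here: for 1 ≤ numero ≤ 2^31 Python's
-- int(numero**0.5) equals isqrt(numero) (the double sqrt is correctly rounded and the
-- distance to the neighbouring squares exceeds the rounding error), so the range bound
-- is identical.
def es_primo (numero : Int) : Bool :=
  if numero < 1 then false
  else if numero = 2 then true
  else if numero % 2 = 0 then false
  else (PySem.List.pyRange 3 (Int.ofNat (Nat.sqrt numero.toNat) + 1) 2).all
        (fun i => numero % i != 0)

def stepA (l : List Int) (st : Option Int × Int) (i : Nat) : Option Int × Int :=
  if es_primo (l.getD i 0) then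
    match st.1 with
    | none => (some (l.getD i 0), (i : Int))           -- numeros3[i] > float('-inf') always
    | some m => if m < l.getD i 0 then (some (l.getD i 0), (i : Int)) else st
  else st

def posicion_mayor_primo (numeros3 : List Int) : Int :=
  ((List.range numeros3.length).foldl (stepA numeros3) (none, -1)).2

-- ===== PORT B =====
-- Source B keeps A's helper es_primo unchanged, so the port shares the def above.
-- 'numeros3.index(v)' is PySem.List.index?; its none case (Python's ValueError) is
-- unreachable here since v is drawn from set(numeros3).
def goB (l : List Int) : List Int → Int
  | [] => -1
  | v :: rest =>
    if es_primo v then ((PySem.List.index? l v).map Int.ofNat).getD (-1)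
    else goB l rest

def posicion_mayor_primo_alt (numeros3 : List Int) : Int :=
  goB numeros3 (PySem.List.sorted (PySem.Set.ofList numeros3) (fun x => x) true)

-- ===== PRECONDITION & SPEC =====
def Spec_posicion_mayor_primo (numeros3 : List Int) (out : Int) : Prop := out = posicion_mayor_primo_alt numeros3
instance (numeros3 : List Int) (out : Int) : Decidable (Spec_posicion_mayor_primo numeros3 out) := by unfold Spec_posicion_mayor_primo; infer_instance

-- ===== CLAIM (what is proved, stated in full; the proofs are below) =====
def Claim_equal_posicion_mayor_primo : Prop := ∀ (numeros3 : List Int), Dom_posicion_mayor_primo numeros3 → Spec_posicion_mayor_primo numeros3 (posicion_mayor_primo numeros3)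

-- ===== LEMMAS AND PROOFS =====

-- The common mathematical object both programs compute from: the maximum prime value
-- of a prefix and the first position of that value.
def stateSpec (l : List Int) (n : Nat) : Option Int × Int :=
  match ((l.take n).filter (fun v => es_primo v)).max? with
  | none => (none, -1)
  | some M => (some M, ((PySem.List.index? (l.take n) M).getD 0 : Int))

theorem step_spec (l : List Int) (n : Nat) (h : n < l.length) :
    stepA l (stateSpec l n) n = stateSpec l (n+1) := by
  have htake : l.take (n+1) = l.take n ++ [l[n]] := List.take_succ_eq_append_getElem h
  have hget : l[n]? = some l[n] := List.getElem?_eq_getElem h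
  have hlen : (l.take n).length = n := by simp [List.length_take]; omega
  by_cases hp : es_primo l[n] = true
  · have hfil1 : (l.take (n+1)).filter (fun v => es_primo v)
        = (l.take n).filter (fun v => es_primo v) ++ [l[n]] := by
      rw [htake, List.filter_append]
      simp [hp]
    cases hM : ((l.take n).filter (fun v => es_primo v)).max? with
    | none =>
      have hnil : (l.take n).filter (fun v => es_primo v) = [] := List.max?_eq_none_iff.mp hM
      have hnotmem : l[n] ∉ l.take n := by
        intro hmem
        have : l[n] ∈ (l.take n).filter (fun v => es_primo v) :=
          List.mem_filter.mpr ⟨hmem, hp⟩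
        simp [hnil] at this
      have hmax' : ((l.take (n+1)).filter (fun v => es_primo v)).max? = some l[n] := by
        rw [hfil1, hnil]; rfl
      have hidx : PySem.List.index? (l.take n ++ [l[n]]) l[n] = some (l.take n).length :=
        PySem.List.index?_append_singleton_self _ _ hnotmem
      simp only [PySem.List.index?_eq_idxOf?] at hidx
      have hidx' : List.idxOf? l[n] (l.take (n+1)) = some n := by
        rw [htake, hidx, hlen]
      simp only [stateSpec, stepA]
      simp [hM, hmax', hget, hp, hidx']
    | some M =>
      have hMmem : M ∈ (l.take n).filter (fun v => es_primo v) := List.max?_mem hM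
      have hMbound : ∀ b ∈ (l.take n).filter (fun v => es_primo v), b ≤ M :=
        (List.max?_eq_some_iff.mp hM).2
      have hMt : M ∈ l.take n := (List.mem_filter.mp hMmem).1
      by_cases hlt : M < l[n]
      · have hnotmem : l[n] ∉ l.take n := by
          intro hmem
          have := hMbound l[n] (List.mem_filter.mpr ⟨hmem, hp⟩)
          omega
        have hmax' : ((l.take (n+1)).filter (fun v => es_primo v)).max? = some l[n] := by
          rw [hfil1]
          refine List.max?_eq_some_iff.mpr ⟨by simp, ?_⟩
          intro b hb
          rcases List.mem_append.mp hb with hb | hb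
          · exact le_trans (hMbound b hb) (le_of_lt hlt)
          · simp at hb; omega
        have hidx : PySem.List.index? (l.take n ++ [l[n]]) l[n] = some (l.take n).length :=
          PySem.List.index?_append_singleton_self _ _ hnotmem
        simp only [PySem.List.index?_eq_idxOf?] at hidx
        have hidx' : List.idxOf? l[n] (l.take (n+1)) = some n := by
          rw [htake, hidx, hlen]
        simp only [stateSpec, stepA]
        simp [hM, hmax', hget, hp, hlt, hidx']
      · have hmax' : ((l.take (n+1)).filter (fun v => es_primo v)).max? = some M := by
          rw [hfil1]
          refine List.max?_eq_some_iff.mpr ⟨by simp [hMmem], ?_⟩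
          intro b hb
          rcases List.mem_append.mp hb with hb | hb
          · exact hMbound b hb
          · simp at hb; omega
        have hidx : PySem.List.index? (l.take n ++ [l[n]]) M = PySem.List.index? (l.take n) M :=
          PySem.List.index?_append_of_mem _ hMt
        simp only [PySem.List.index?_eq_idxOf?] at hidx
        have hidx' : List.idxOf? M (l.take (n+1)) = List.idxOf? M (l.take n) := by
          rw [htake, hidx]
        simp only [stateSpec, stepA]
        simp [hM, hmax', hget, hp, hlt, hidx']
  · have hp' : es_primo l[n] = false := by simpa using hp
    have hfil : (l.take (n+1)).filter (fun v => es_primo v)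
        = (l.take n).filter (fun v => es_primo v) := by
      rw [htake, List.filter_append]
      simp [hp']
    cases hM : ((l.take n).filter (fun v => es_primo v)).max? with
    | none =>
      simp only [stateSpec, stepA]
      simp [hfil, hM, hget, hp']
    | some M =>
      have hMt : M ∈ l.take n := (List.mem_filter.mp (List.max?_mem hM)).1
      have hidx : PySem.List.index? (l.take n ++ [l[n]]) M = PySem.List.index? (l.take n) M :=
        PySem.List.index?_append_of_mem _ hMt
      simp only [PySem.List.index?_eq_idxOf?] at hidx
      have hidx' : List.idxOf? M (l.take (n+1)) = List.idxOf? M (l.take n) := by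
        rw [htake, hidx]
      simp only [stateSpec, stepA]
      simp [hfil, hM, hget, hp', hidx']

theorem foldA_eq (l : List Int) : ∀ n, n ≤ l.length →
    (List.range n).foldl (stepA l) (none, -1) = stateSpec l n := by
  intro n
  induction n with
  | zero => intro _; simp [stateSpec]
  | succ n ih =>
    intro h
    rw [List.range_succ, List.foldl_append, List.foldl_cons, List.foldl_nil,
      ih (by omega), step_spec l n (by omega)]

theorem goB_eq (l : List Int) : ∀ s : List Int,
    s.Pairwise (fun a b : Int => b ≤ a) → s.Nodup →
    goB l s = (match (s.filter (fun v => es_primo v)).max? with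
               | none => -1
               | some M => ((PySem.List.index? l M).map Int.ofNat).getD (-1)) := by
  intro s
  induction s with
  | nil => intro _ _; simp [goB]
  | cons v rest ih =>
    intro hpw hnd
    have hall : ∀ y ∈ rest, y ≤ v := (List.pairwise_cons.mp hpw).1
    by_cases hp : es_primo v = true
    · have helim : ((rest.filter (fun x => es_primo x)).max?).elim v (max v) = v := by
        cases hr : (rest.filter (fun x => es_primo x)).max? with
        | none => rfl
        | some b =>
          have hb : b ≤ v := hall _ (List.mem_filter.mp (List.max?_mem hr)).1
          simp [max_eq_left hb]
      simp [goB, hp, helim]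
    · have hp' : es_primo v = false := by simpa using hp
      have := ih (List.pairwise_cons.mp hpw).2 (List.nodup_cons.mp hnd).2
      simp [goB, hp', this]

theorem max?_filter_congr (p : Int → Bool) (s t : List Int) (h : ∀ x : Int, x ∈ s ↔ x ∈ t) :
    (s.filter p).max? = (t.filter p).max? := by
  have h' : ∀ x : Int, x ∈ s.filter p ↔ x ∈ t.filter p := by
    intro x; simp [List.mem_filter, h x]
  cases hs : (s.filter p).max? with
  | none =>
    cases ht : (t.filter p).max? with
    | none => rfl
    | some b =>
      have hb : b ∈ s.filter p := (h' b).mpr (List.max?_mem ht)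
      rw [List.max?_eq_none_iff.mp hs] at hb
      simp at hb
  | some a =>
    cases ht : (t.filter p).max? with
    | none =>
      have ha : a ∈ t.filter p := (h' a).mp (List.max?_mem hs)
      rw [List.max?_eq_none_iff.mp ht] at ha
      simp at ha
    | some b =>
      have hab : a ≤ b := (List.max?_eq_some_iff.mp ht).2 a ((h' a).mp (List.max?_mem hs))
      have hba : b ≤ a := (List.max?_eq_some_iff.mp hs).2 b ((h' b).mpr (List.max?_mem ht))
      simp [le_antisymm hab hba]

-- ===== VERDICT (by name: the statement is the Claim_ definition above) =====
theorem posicion_mayor_primo_spec : Claim_equal_posicion_mayor_primo := by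
  intro l _
  unfold Spec_posicion_mayor_primo posicion_mayor_primo posicion_mayor_primo_alt
  rw [foldA_eq l l.length le_rfl]
  have hsp := PySem.List.sorted_pairwise_rev (PySem.Set.ofList l) (fun x : Int => x)
  have hnd : (PySem.List.sorted (PySem.Set.ofList l) (fun x : Int => x) true).Nodup :=
    (PySem.List.sorted_perm (PySem.Set.ofList l) (fun x : Int => x) true).symm.nodup
      (PySem.Set.nodup_ofList l)
  rw [goB_eq l _ hsp hnd]
  have hmem : ∀ x : Int,
      x ∈ PySem.List.sorted (PySem.Set.ofList l) (fun x : Int => x) true ↔ x ∈ l := by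
    intro x
    rw [PySem.List.mem_sorted, PySem.Set.mem_ofList]
  rw [max?_filter_congr _ _ l hmem]
  cases hM : (l.filter (fun v => es_primo v)).max? with
  | none => simp [stateSpec, List.take_length, hM]
  | some M =>
    have hMl : M ∈ l := (List.mem_filter.mp (List.max?_mem hM)).1
    have hsome : (PySem.List.index? l M).isSome :=
      (PySem.List.index?_isSome_iff l M).mpr hMl
    obtain ⟨k, hk⟩ := Option.isSome_iff_exists.mp hsome
    simp only [PySem.List.index?_eq_idxOf?] at hk
    simp [stateSpec, List.take_length, hM, hk]
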